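-- pv_equiv track=rewrite | github.com/shiorisio/coder | 200530/a3.py | popall
-- ===== SOURCE A (Python) =====
-- def popall(M):
--     c = []
--     for i in range(0,len(M)):
--         if i > 0:
--             a = M[0:i] + M[i+1::]
--         elif i == 0:
--             a = M[i+1::]
--         c.append(''.join(a))
--     return c
-- ===== SOURCE B (Python) =====
-- def popall(M):
--     pre = [""]
--     for s in M:
--         pre.append(pre[-1] + s)
--     rsuf = [""]
--     for s in reversed(M):
--         rsuf.append(s + rsuf[-1])
--     suf = list(reversed(rsuf))
--     return [pre[i] + suf[i + 1] for i in range(len(M))]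
-- ===== Notes on version B (the rewrite author's own statement) =====
-- stated objective: alternative
-- what changed: Replaces the per-index slice-and-rejoin with two cumulative-join tables (prefixes and suffixes) built in single passes, combined as prefix[i]+suffix[i+1].
import Mathlib
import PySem

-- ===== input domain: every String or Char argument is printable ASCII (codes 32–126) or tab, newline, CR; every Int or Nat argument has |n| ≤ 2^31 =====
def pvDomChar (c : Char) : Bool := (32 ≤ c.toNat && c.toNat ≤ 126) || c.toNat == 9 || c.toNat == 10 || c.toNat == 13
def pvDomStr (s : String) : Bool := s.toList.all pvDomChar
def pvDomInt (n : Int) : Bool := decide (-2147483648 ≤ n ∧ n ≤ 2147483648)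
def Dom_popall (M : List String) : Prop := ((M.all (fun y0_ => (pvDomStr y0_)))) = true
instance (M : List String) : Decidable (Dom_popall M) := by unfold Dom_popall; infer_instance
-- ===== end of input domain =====

-- B replaces A's per-index slice-and-rejoin with cumulative prefix/suffix join tables (alternative decomposition; return value only, A does not mutate M).

-- ===== PORT A =====
def popall (M : List String) : List String :=
  (PySem.List.pyRange 0 (M.length : Int) 1).foldl
    (fun c i =>
      let a : List String :=
        if i > 0 then
          PySem.List.slice M (some 0) (some i) ++ PySem.List.slice M (some (i + 1)) none
        else
          PySem.List.slice M (some (i + 1)) none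
      c ++ [PySem.Str.join "" a]) []

-- ===== PORT B =====
-- exact Python string concatenation 'a + b', kept on the List Char side
def pvCat (a b : String) : String := String.ofList (a.toList ++ b.toList)

def popall_alt (M : List String) : List String :=
  let pre : List String := M.foldl (fun acc s => acc ++ [pvCat (acc.getLastD "") s]) [""]
  let rsuf : List String := M.reverse.foldl (fun acc s => acc ++ [pvCat s (acc.getLastD "")]) [""]
  let suf : List String := rsuf.reverse
  (List.range M.length).map (fun i => pvCat (pre.getD i "") (suf.getD (i + 1) ""))

-- ===== PRECONDITION & SPEC =====
def Spec_popall (M : List String) (out : List String) : Prop := out = popall_alt M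
instance (M : List String) (out : List String) : Decidable (Spec_popall M out) := by unfold Spec_popall; infer_instance

-- ===== CLAIM (what is proved, stated in full; the proofs are below) =====
def Claim_equal_popall : Prop := ∀ (M : List String), Dom_popall M → Spec_popall M (popall M)

-- ===== LEMMAS AND PROOFS =====

theorem pvIntersperse_nil_flatten (L : List (List Char)) :
    (List.intersperse ([] : List Char) L).flatten = L.flatten := by
  induction L with
  | nil => simp
  | cons a t ih =>
    cases t with
    | nil => simp
    | cons b u => simpa [List.intersperse] using ih

theorem pvToList_cat (a b : String) : (pvCat a b).toList = a.toList ++ b.toList := by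
  simp [pvCat]

theorem pvChars_join_nil (L : List (List Char)) : PySem.Chars.join [] L = L.flatten := by
  simp [PySem.Chars.join, List.intercalate, pvIntersperse_nil_flatten]

theorem pvJ_nil : PySem.Str.join "" ([] : List String) = "" :=
  String.toList_inj.mp (by simp)

theorem pvCat_empty (a : String) : pvCat a "" = a :=
  String.toList_inj.mp (by simp [pvToList_cat])

theorem pvCat_J_cons (a s : String) (X : List String) :
    pvCat a (PySem.Str.join "" (s :: X)) = pvCat (pvCat a s) (PySem.Str.join "" X) :=
  String.toList_inj.mp (by simp [pvToList_cat, pvChars_join_nil])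

theorem pvJ_cons (s : String) (X : List String) :
    PySem.Str.join "" (s :: X) = pvCat s (PySem.Str.join "" X) :=
  String.toList_inj.mp (by simp [pvToList_cat, pvChars_join_nil])

theorem pvCat_J_J (X Y : List String) :
    pvCat (PySem.Str.join "" X) (PySem.Str.join "" Y) = PySem.Str.join "" (X ++ Y) :=
  String.toList_inj.mp (by simp [pvToList_cat, pvChars_join_nil])

theorem pvFoldl_snoc {α β : Type} (g : α → β) (l : List α) (init : List β) :
    l.foldl (fun c x => c ++ [g x]) init = init ++ l.map g := by
  induction l generalizing init with
  | nil => simp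
  | cons x t ih => simp [ih]

-- A's result, characterised as a map over indices
theorem pvA_char (M : List String) :
    popall M =
      (List.range M.length).map
        (fun k => PySem.Str.join "" (M.take k ++ M.drop (k + 1))) := by
  unfold popall
  rw [PySem.List.pyRange_one]
  simp only [Int.sub_zero, Int.toNat_natCast, List.foldl_map]
  rw [pvFoldl_snoc (fun k : Nat =>
    (fun i : Int =>
      let a : List String :=
        if i > 0 then
          PySem.List.slice M (some 0) (some i) ++ PySem.List.slice M (some (i + 1)) none
        else
          PySem.List.slice M (some (i + 1)) none
      PySem.Str.join "" a) ((0 : Int) + (k : Int)))]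
  simp only [List.nil_append]
  refine List.map_congr_left (fun k _ => ?_)
  simp only [Int.zero_add]
  by_cases hk : k = 0
  · subst hk
    simp [PySem.List.slice_from_one]
  · have hpos : (0 : Int) < (k : Int) := by
      exact_mod_cast Nat.pos_of_ne_zero hk
    have h1 : ((k : Int) + 1) = (((k + 1 : Nat)) : Int) := by push_cast; ring
    simp only [gt_iff_lt, hpos, if_true, PySem.List.slice_zero_start]
    rw [h1, PySem.List.slice_from_natCast, PySem.List.slice_to_natCast]

-- the prefix table is the table of joins of prefixes
theorem pvPre_gen (M : List String) (acc : List String) (a : String) :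
    M.foldl (fun acc s => acc ++ [pvCat (acc.getLastD "") s]) (acc ++ [a]) =
      acc ++ (List.range (M.length + 1)).map
        (fun i => pvCat a (PySem.Str.join "" (M.take i))) := by
  induction M generalizing acc a with
  | nil => simp [pvJ_nil, pvCat_empty]
  | cons s t ih =>
    simp only [List.foldl_cons, List.getLastD_concat]
    rw [ih (acc ++ [a]) (pvCat a s)]
    simp only [List.length_cons]
    rw [List.range_succ_eq_map (n := t.length + 1), List.map_cons, List.map_map]
    simp only [List.take_zero, pvJ_nil, pvCat_empty, List.append_assoc,
      List.singleton_append]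
    refine congrArg _ (congrArg _ (List.map_congr_left (fun i _ => ?_)))
    simp [Function.comp, Nat.succ_eq_add_one, List.take_succ_cons, pvCat_J_cons]

theorem pvPre_spec (M : List String) :
    M.foldl (fun acc s => acc ++ [pvCat (acc.getLastD "") s]) [""] =
      (List.range (M.length + 1)).map (fun i => PySem.Str.join "" (M.take i)) := by
  have := pvPre_gen M [] ""
  simp only [List.nil_append] at this
  rw [this]
  refine List.map_congr_left (fun i _ => ?_)
  exact String.toList_inj.mp (by simp [pvToList_cat])

-- the reversed suffix table is the reversed table of joins of suffixes
theorem pvRsuf_spec (M : List String) :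
    M.foldr (fun s acc => acc ++ [pvCat s (acc.getLastD "")]) [""] =
      ((List.range (M.length + 1)).map (fun i => PySem.Str.join "" (M.drop i))).reverse := by
  induction M with
  | nil => simp [pvJ_nil]
  | cons s t ih =>
    simp only [List.foldr_cons, ih, List.length_cons]
    have hlast : ((((List.range (t.length + 1)).map
        (fun i => PySem.Str.join "" (t.drop i))).reverse).getLastD "") = PySem.Str.join "" t := by
      rw [List.getLastD_eq_getLast?, List.getLast?_reverse]
      rw [List.range_succ_eq_map, List.map_cons]
      simp
    rw [hlast]
    rw [List.range_succ_eq_map (n := t.length + 1), List.map_cons, List.map_map,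
      List.reverse_cons]
    congr 1
    simp [pvJ_cons]

-- ===== VERDICT (by name: the statement is the Claim_ definition above) =====
theorem popall_spec : Claim_equal_popall := by
  intro M _
  show popall M = popall_alt M
  rw [pvA_char]
  unfold popall_alt
  simp only [List.foldl_reverse, pvRsuf_spec, List.reverse_reverse, pvPre_spec]
  refine List.map_congr_left (fun i hi => ?_)
  rw [List.mem_range] at hi
  rw [PySem.List.getD_map_range _ _ _ _ (by omega),
      PySem.List.getD_map_range _ _ _ _ (by omega),
      pvCat_J_J]
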